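-- pv_equiv track=rewrite | github.com/praveen040-gif/DSA | Daily Leetcode Question/2554. Maximum Number of Integers to Choose From a Range I.py | maxCount
-- ===== SOURCE A (Python) =====
-- from typing import List
--
-- def maxCount(banned: List[int], n: int, maxSum: int) -> int:
--     c=0
--     sum1=0
--     banned=set(banned)
--     for i in range(1,n+1):
--         if i not in banned:
--             sum1=sum1+i
--             if sum1<=maxSum:
--                 c+=1
--             else:
--                 return c
--     return c
-- ===== SOURCE B (Python) =====
-- from typing import List
--
-- def _gap_take(a, length, budget):
--     # largest m in [0, length] with a + (a+1) + ... + (a+m-1) <= budget, by binary search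
--     lo, hi = 0, length
--     while lo < hi:
--         mid = (lo + hi + 1) // 2
--         if mid * (2 * a + mid - 1) // 2 <= budget:
--             lo = mid
--         else:
--             hi = mid - 1
--     return lo
--
-- def maxCount(banned: List[int], n: int, maxSum: int) -> int:
--     bs = sorted({b for b in banned if 1 <= b <= n})
--     count = 0
--     budget = maxSum
--     lo = 1
--     for b in bs + [n + 1]:
--         hi = b - 1
--         length = hi - lo + 1
--         if length > 0:
--             m = _gap_take(lo, length, budget)
--             count += m
--             if m < length:
--                 return count
--             budget -= (lo + hi) * length // 2
--         lo = b + 1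
--     return count
-- ===== Notes on version B (the rewrite author's own statement) =====
-- stated objective: faster
-- what changed: A scans 1..n one integer at a time accumulating the sum; B sorts the distinct in-range banned values and jumps over each gap between them in one step using the arithmetic-series sum, binary-searching inside the final partial gap.
import Mathlib
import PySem

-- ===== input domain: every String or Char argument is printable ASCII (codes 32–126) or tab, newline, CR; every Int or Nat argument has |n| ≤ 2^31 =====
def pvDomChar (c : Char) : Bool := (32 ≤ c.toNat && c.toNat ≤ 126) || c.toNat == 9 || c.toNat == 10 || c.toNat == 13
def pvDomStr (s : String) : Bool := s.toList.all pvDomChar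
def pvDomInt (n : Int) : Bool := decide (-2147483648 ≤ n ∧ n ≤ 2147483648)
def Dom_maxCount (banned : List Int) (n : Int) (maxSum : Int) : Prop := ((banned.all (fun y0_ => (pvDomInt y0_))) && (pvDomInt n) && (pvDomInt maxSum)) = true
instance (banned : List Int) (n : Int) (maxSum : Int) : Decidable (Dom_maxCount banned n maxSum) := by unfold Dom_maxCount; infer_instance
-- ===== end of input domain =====

-- B replaces A's linear scan of 1..n by: sort the distinct in-range banned values, walk the gaps
-- between them using the arithmetic-series sum, binary-searching the last (partial) gap.

-- ===== PORT A =====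
-- the for-loop of A over i in range(1, n+1): state (sum1, c), early return when sum1 exceeds maxSum
-- (the lazy range is ported as an index recursion, so the early return stops the loop as in Python)
def maxCountLoopA (bset : List Int) (n maxSum : Int) (i sum1 c : Int) : Int :=
  if h : i < n + 1 then
    if bset.contains i then maxCountLoopA bset n maxSum (i + 1) sum1 c
    else
      let s := sum1 + i
      if s ≤ maxSum then maxCountLoopA bset n maxSum (i + 1) s (c + 1) else c
  else c
termination_by (n + 1 - i).toNat
decreasing_by all_goals omega

def maxCount (banned : List Int) (n : Int) (maxSum : Int) : Int :=
  let bset := PySem.Set.ofList banned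
  maxCountLoopA bset n maxSum 1 0 0

-- ===== PORT B =====
-- _gap_take's while-loop (binary search), faithful to Source B
def gapTakeB (a budget : Int) (lo hi : Int) : Int :=
  if h : lo < hi then
    -- mid = (lo + hi + 1) // 2, written out at each use
    if PySem.Int.floordiv ((PySem.Int.floordiv (lo + hi + 1) 2) * (2 * a + (PySem.Int.floordiv (lo + hi + 1) 2) - 1)) 2 ≤ budget then
      gapTakeB a budget (PySem.Int.floordiv (lo + hi + 1) 2) hi
    else gapTakeB a budget lo ((PySem.Int.floordiv (lo + hi + 1) 2) - 1)
  else lo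
termination_by (hi - lo).toNat
decreasing_by
  · have hb : lo + 1 ≤ PySem.Int.floordiv ((lo+1) + hi) 2 ∧ PySem.Int.floordiv ((lo+1) + hi) 2 ≤ hi :=
      PySem.Int.floordiv_two_mid_bounds (by omega)
    have he : (lo+1) + hi = lo + hi + 1 := by ring
    rw [he] at hb
    omega
  · have hb : lo + 1 ≤ PySem.Int.floordiv ((lo+1) + hi) 2 ∧ PySem.Int.floordiv ((lo+1) + hi) 2 ≤ hi :=
      PySem.Int.floordiv_two_mid_bounds (by omega)
    have he : (lo+1) + hi = lo + hi + 1 := by ring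
    rw [he] at hb
    omega

-- the for-loop of Source B over bs + [n+1]: state (lo, budget, count), early return inside a partial gap
def altLoopB : List Int → Int → Int → Int → Int
  | [], _, _, count => count
  | b :: rest, lo, budget, count =>
    let hi := b - 1
    let length := hi - lo + 1
    if 0 < length then
      let m := gapTakeB lo budget 0 length
      if m < length then count + m
      else altLoopB rest (b + 1) (budget - PySem.Int.floordiv ((lo + hi) * length) 2) (count + m)
    else altLoopB rest (b + 1) budget count

def maxCount_alt (banned : List Int) (n : Int) (maxSum : Int) : Int :=
  let bs := PySem.List.sorted (PySem.Set.ofList (banned.filter (fun b => decide (1 ≤ b) && decide (b ≤ n)))) (fun x => x) false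
  altLoopB (bs ++ [n + 1]) 1 maxSum 0

-- ===== PRECONDITION & SPEC =====
def Spec_maxCount (banned : List Int) (n : Int) (maxSum : Int) (out : Int) : Prop := out = maxCount_alt banned n maxSum
instance (banned : List Int) (n : Int) (maxSum : Int) (out : Int) : Decidable (Spec_maxCount banned n maxSum out) := by unfold Spec_maxCount; infer_instance

-- ===== CLAIM (what is proved, stated in full; the proofs are below) =====
def Claim_equal_maxCount : Prop := ∀ (banned : List Int) (n : Int) (maxSum : Int), Dom_maxCount banned n maxSum → Spec_maxCount banned n maxSum (maxCount banned n maxSum)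

-- ===== LEMMAS AND PROOFS =====

-- reference count: walk a list, counting a prefix whose running sum stays within the budget
def cnt : List Int → Int → Nat
  | [], _ => 0
  | x :: xs, s => if x ≤ s then cnt xs (s - x) + 1 else 0

-- the consecutive integers a, a+1, …, a+len-1
def irange (a : Int) (len : Nat) : List Int := (List.range len).map (fun (k : Nat) => a + (k : Int))

theorem irange_zero (a : Int) : irange a 0 = [] := rfl

theorem irange_succ (a : Int) (len : Nat) : irange a (len + 1) = a :: irange (a + 1) len := by
  unfold irange
  rw [List.range_succ_eq_map, List.map_cons, List.map_map]
  congr 1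
  · simp
  · apply List.map_congr_left; intro k _; simp only [Function.comp]; push_cast; ring

theorem irange_one (a : Int) : irange a 1 = [a] := by
  rw [irange_succ, irange_zero]

theorem irange_append (a : Int) (m k : Nat) :
    irange a (m + k) = irange a m ++ irange (a + m) k := by
  unfold irange
  rw [List.range_add, List.map_append, List.map_map]
  congr 1
  apply List.map_congr_left; intro j _; simp [Function.comp]; ring_nf

theorem mem_irange {x a : Int} {len : Nat} (h : x ∈ irange a len) : a ≤ x ∧ x < a + len := by
  unfold irange at h
  simp only [List.mem_map, List.mem_range] at h
  obtain ⟨k, hk, rfl⟩ := h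
  exact ⟨by omega, by omega⟩

theorem length_irange (a : Int) (len : Nat) : (irange a len).length = len := by
  simp [irange]

theorem two_mul_sum_irange (a : Int) (m : Nat) :
    2 * (irange a m).sum = (m : Int) * (2 * a + m - 1) := by
  induction m with
  | zero => simp [irange]
  | succ m ih =>
    have h : irange a (m + 1) = irange a m ++ [a + m] := by
      rw [irange_append a m 1, irange_one]
    rw [h, List.sum_append, List.sum_cons, List.sum_nil]
    push_cast
    push_cast at ih
    linear_combination ih

theorem sum_irange_nonneg (a : Int) (m : Nat) (ha : 0 ≤ a) : 0 ≤ (irange a m).sum := by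
  apply List.sum_nonneg
  intro x hx
  have := mem_irange hx
  omega

theorem sum_irange_mono (a : Int) {p q : Nat} (ha : 0 ≤ a) (h : p ≤ q) :
    (irange a p).sum ≤ (irange a q).sum := by
  have hq : q = p + (q - p) := by omega
  rw [hq, irange_append, List.sum_append]
  have := sum_irange_nonneg (a + p) (q - p) (by omega)
  omega

theorem cnt_le_length (xs : List Int) (s : Int) : cnt xs s ≤ xs.length := by
  induction xs generalizing s with
  | nil => simp [cnt]
  | cons x xs ih =>
    simp only [cnt, List.length_cons]
    split
    · exact Nat.succ_le_succ (ih _)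
    · omega

theorem cnt_append (xs ys : List Int) (s : Int) :
    cnt (xs ++ ys) s = if cnt xs s < xs.length then cnt xs s else xs.length + cnt ys (s - xs.sum) := by
  induction xs generalizing s with
  | nil => simp [cnt]
  | cons x xs ih =>
    simp only [List.cons_append, cnt, List.length_cons, List.sum_cons]
    by_cases hx : x ≤ s
    · rw [if_pos hx, if_pos hx, ih, show s - (x + xs.sum) = s - x - xs.sum from by ring]
      have hle := cnt_le_length xs (s - x)
      split_ifs <;> omega
    · rw [if_neg hx, if_neg hx, if_pos (by omega)]

-- characterisation of cnt on a consecutive range: it is the maximal prefix within budget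
theorem cnt_irange_spec (len : Nat) : ∀ (a s : Int), 1 ≤ a →
    cnt (irange a len) s ≤ len ∧
    (cnt (irange a len) s = 0 ∨ (irange a (cnt (irange a len) s)).sum ≤ s) ∧
    (cnt (irange a len) s < len → s < (irange a (cnt (irange a len) s + 1)).sum) := by
  induction len with
  | zero => intro a s _; simp [irange, cnt]
  | succ len ih =>
    intro a s ha
    rw [irange_succ]
    simp only [cnt]
    by_cases hx : a ≤ s
    · rw [if_pos hx]
      obtain ⟨h1, h2, h3⟩ := ih (a + 1) (s - a) (by omega)
      refine ⟨by omega, ?_, ?_⟩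
      · right
        rw [irange_succ, List.sum_cons]
        rcases h2 with h2 | h2
        · rw [h2]; simp [irange]; omega
        · omega
      · intro hlt
        have := h3 (by omega)
        rw [irange_succ, List.sum_cons]
        omega
    · rw [if_neg hx]
      refine ⟨by omega, by left; rfl, fun _ => ?_⟩
      rw [irange_one]; simp; omega

-- the binary search of _gap_take finds exactly cnt of the gap
theorem gapTakeB_inv (a s len : Int) (ha : 1 ≤ a) (hlen : 0 ≤ len) :
    ∀ (k : Nat) (lo hi : Int), (hi - lo).toNat = k → 0 ≤ lo → lo ≤ hi → hi ≤ len →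
    (lo = 0 ∨ (irange a lo.toNat).sum ≤ s) →
    (∀ m : Nat, hi < (m : Int) → (m : Int) ≤ len → ¬ ((irange a m).sum ≤ s)) →
    gapTakeB a s lo hi = (cnt (irange a len.toNat) s : Int) := by
  intro k
  induction k using Nat.strong_induction_on with
  | _ k ihk =>
    intro lo hi hk h0 hlohi hhile hPlo hno
    rw [gapTakeB]
    by_cases hlt : lo < hi
    · rw [dif_pos hlt]
      have hb : lo + 1 ≤ PySem.Int.floordiv ((lo+1) + hi) 2 ∧ PySem.Int.floordiv ((lo+1) + hi) 2 ≤ hi :=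
        PySem.Int.floordiv_two_mid_bounds (by omega)
      have he : (lo+1) + hi = lo + hi + 1 := by ring
      rw [he] at hb
      set mid := PySem.Int.floordiv (lo + hi + 1) 2 with hmid
      -- the probe equals the gap prefix sum
      have hmidnat : (mid.toNat : Int) = mid := by omega
      have hprobe : PySem.Int.floordiv (mid * (2 * a + mid - 1)) 2 = (irange a mid.toNat).sum := by
        have h2 : mid * (2 * a + mid - 1) = 2 * (irange a mid.toNat).sum := by
          rw [two_mul_sum_irange, hmidnat]
        rw [h2, PySem.Int.floordiv_eq_ediv_of_pos (by omega)]
        omega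
      rw [hprobe]
      by_cases hP : (irange a mid.toNat).sum ≤ s
      · rw [if_pos hP]
        exact ihk (hi - mid).toNat (by omega) mid hi (by omega) (by omega) (by omega) hhile
          (Or.inr hP) hno
      · rw [if_neg hP]
        refine ihk (mid - 1 - lo).toNat (by omega) lo (mid - 1) (by omega) h0 (by omega) (by omega)
          hPlo ?_
        intro m hm1 hm2
        by_cases hmhi : (m : Int) ≤ hi
        · intro hms
          apply hP
          calc (irange a mid.toNat).sum ≤ (irange a m).sum :=
                sum_irange_mono a (by omega) (by omega)
            _ ≤ s := hms
        · exact hno m (by omega) hm2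
    · rw [dif_neg hlt]
      -- lo = hi: extract the answer
      have hlohi' : lo = hi := by omega
      obtain ⟨hc1, hc2, hc3⟩ := cnt_irange_spec len.toNat a s ha
      set c := cnt (irange a len.toNat) s with hc
      rcases lt_trichotomy lo (c : Int) with h | h | h
      · exfalso
        rcases hc2 with h2 | h2
        · omega
        · exact hno c (by omega) (by omega) h2
      · exact h
      · exfalso
        -- c < lo, so lo ≥ 1 and prefix of size lo fits, contradicting maximality at c
        rcases hPlo with rfl | hPlo
        · omega
        · have hcl : c < len.toNat := by omega
          have := hc3 hcl
          have hmono : (irange a (c + 1)).sum ≤ (irange a lo.toNat).sum :=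
            sum_irange_mono a (by omega) (by omega)
          omega

theorem gapTakeB_eq (a s len : Int) (ha : 1 ≤ a) (hlen : 0 ≤ len) :
    gapTakeB a s 0 len = (cnt (irange a len.toNat) s : Int) := by
  refine gapTakeB_inv a s len ha hlen len.toNat 0 len (by omega) (by omega) hlen le_rfl
    (Or.inl rfl) ?_
  intro m hm1 hm2; omega

-- A's loop counts the within-budget prefix of the non-banned part of the remaining range
theorem loopA_eq (bset : List Int) (n S : Int) :
    ∀ (k : Nat) (i sum1 c : Int), (n + 1 - i).toNat = k →
    maxCountLoopA bset n S i sum1 c =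
      c + (cnt ((PySem.List.pyRange i (n + 1) 1).filter (fun j => !(bset.contains j))) (S - sum1) : Int) := by
  intro k
  induction k using Nat.strong_induction_on with
  | _ k ihk =>
    intro i sum1 c hk
    rw [maxCountLoopA]
    by_cases hlt : i < n + 1
    · rw [dif_pos hlt, PySem.List.pyRange_one_cons hlt, List.filter_cons]
      by_cases hmem : bset.contains i
      · rw [if_pos hmem, if_neg (by simp only [Bool.not_eq_true']; simpa using hmem)]
        exact ihk (n + 1 - (i + 1)).toNat (by omega) (i + 1) sum1 c rfl
      · rw [if_neg hmem]
        have hb : (!(bset.contains i)) = true := by simpa using hmem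
        rw [hb, if_pos rfl]
        simp only [cnt]
        by_cases hs : sum1 + i ≤ S
        · rw [if_pos hs, if_pos (by omega),
            ihk (n + 1 - (i + 1)).toNat (by omega) (i + 1) (sum1 + i) (c + 1) rfl,
            show S - (sum1 + i) = S - sum1 - i from by ring]
          push_cast
          ring
        · rw [if_neg hs, if_neg (by omega)]
          simp
    · rw [dif_neg hlt, PySem.List.pyRange_one_eq_nil (by omega)]
      simp [cnt]

-- B's gap walk counts the same prefix over the range [lo, n], for a sorted in-range banned list
theorem altLoopB_eq (n : Int) :
    ∀ (bs : List Int) (lo s c : Int), 1 ≤ lo → bs.Pairwise (· < ·) →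
    (∀ b ∈ bs, lo ≤ b ∧ b ≤ n) →
    altLoopB (bs ++ [n + 1]) lo s c =
      c + (cnt ((irange lo (n + 1 - lo).toNat).filter (fun i => !(bs.contains i))) s : Int) := by
  intro bs
  induction bs with
  | nil =>
    intro lo s c hlo _ _
    have hfl : (irange lo (n + 1 - lo).toNat).filter (fun i => !(([] : List Int).contains i)) =
        irange lo (n + 1 - lo).toNat := by
      apply List.filter_eq_self.mpr; intro x _; simp
    rw [hfl]
    simp only [List.nil_append, altLoopB]
    by_cases hlen : 0 < n - 1 - lo + 1 + 1
    · rw [if_pos (by omega)]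
      have hg := gapTakeB_eq lo s (n + 1 - 1 - lo + 1) hlo (by omega)
      have he : n + 1 - 1 - lo + 1 = n + 1 - lo := by ring
      rw [he] at hg
      have hcle := cnt_le_length (irange lo (n + 1 - lo).toNat) s
      rw [length_irange] at hcle
      by_cases hm : gapTakeB lo s 0 (n + 1 - 1 - lo + 1) < n + 1 - 1 - lo + 1
      · rw [if_pos hm]
        rw [he] at hm ⊢
        rw [hg]
      · rw [if_neg hm]
        rw [he] at hm ⊢
        rw [hg]
    · rw [if_neg (by omega)]
      have : (n + 1 - lo).toNat = 0 := by omega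
      rw [this, irange_zero]
      simp [cnt]
  | cons b rest ih =>
    intro lo s c hlo hpw hbd
    have hbl : lo ≤ b ∧ b ≤ n := hbd b (by simp)
    have hrest : ∀ r ∈ rest, b < r := by
      intro r hr; exact (List.pairwise_cons.mp hpw).1 r hr
    -- split the range at b
    have hsplit : irange lo (n + 1 - lo).toNat =
        irange lo (b - lo).toNat ++ (b :: irange (b + 1) (n - b).toNat) := by
      have h1 : (n + 1 - lo).toNat = (b - lo).toNat + ((n - b).toNat + 1) := by omega
      rw [h1, irange_append]
      congr 1
      have h2 : lo + ((b - lo).toNat : Int) = b := by omega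
      rw [h2, irange_succ]
    rw [hsplit]
    -- filter acts trivially on the left part, removes b, reduces to rest on the right
    have hfX : (irange lo (b - lo).toNat).filter (fun i => !((b :: rest).contains i)) =
        irange lo (b - lo).toNat := by
      apply List.filter_eq_self.mpr
      intro x hx
      have hxr := mem_irange hx
      have h1 : x ≠ b := by omega
      have h2 : x ∉ rest := fun h => by have := hrest x h; omega
      simp [h1, h2]
    have hfb : ((b : Int) :: irange (b + 1) (n - b).toNat).filter (fun i => !((b :: rest).contains i)) =
        (irange (b + 1) (n - b).toNat).filter (fun i => !(rest.contains i)) := by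
      rw [List.filter_cons]
      have hbb : (!((b :: rest).contains b)) = false := by simp
      rw [hbb]
      simp only [Bool.false_eq_true, if_false]
      apply List.filter_congr
      intro x hx
      have hxr := mem_irange hx
      have h1 : x ≠ b := by omega
      simp [h1]
    rw [List.filter_append, hfX, hfb]
    set Y' := (irange (b + 1) (n - b).toNat).filter (fun i => !(rest.contains i)) with hY'
    rw [cnt_append, length_irange]
    -- the port side
    simp only [List.cons_append, altLoopB]
    have hihc : ∀ r ∈ rest, b + 1 ≤ r ∧ r ≤ n := by
      intro r hr; exact ⟨by have := hrest r hr; omega, (hbd r (by simp [hr])).2⟩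
    by_cases hlen : 0 < b - 1 - lo + 1
    · rw [if_pos hlen]
      have he : b - 1 - lo + 1 = b - lo := by ring
      have hg := gapTakeB_eq lo s (b - lo) hlo (by omega)
      have hcle := cnt_le_length (irange lo (b - lo).toNat) s
      rw [length_irange] at hcle
      by_cases hm : gapTakeB lo s 0 (b - 1 - lo + 1) < b - 1 - lo + 1
      · rw [if_pos hm]
        rw [he] at hm ⊢
        rw [hg] at hm ⊢
        rw [if_pos (by omega)]
      · rw [if_neg hm]
        rw [he] at hm ⊢
        rw [hg] at hm
        have hsum : PySem.Int.floordiv ((lo + (b - 1)) * (b - 1 - lo + 1)) 2 =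
            (irange lo (b - lo).toNat).sum := by
          have h2 : (lo + (b - 1)) * (b - 1 - lo + 1) = 2 * (irange lo (b - lo).toNat).sum := by
            rw [two_mul_sum_irange]
            have : ((b - lo).toNat : Int) = b - lo := by omega
            rw [this]; ring
          rw [h2, PySem.Int.floordiv_eq_ediv_of_pos (by omega)]
          omega
        rw [he] at hsum
        rw [hsum, ih (b + 1) (s - (irange lo (b - lo).toNat).sum) (c + gapTakeB lo s 0 (b - lo))
          (by omega) (List.pairwise_cons.mp hpw).2 hihc]
        have hn : (n + 1 - (b + 1)).toNat = (n - b).toNat := by omega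
        rw [hn, hg]
        rw [if_neg (by omega)]
        have hceq : cnt (irange lo (b - lo).toNat) s = (b - lo).toNat := by omega
        rw [hceq, ← hY']
        omega
    · rw [if_neg hlen]
      -- b = lo: empty gap
      have hb0 : (b - lo).toNat = 0 := by omega
      rw [hb0, irange_zero] at *
      rw [ih (b + 1) s c (by omega) (List.pairwise_cons.mp hpw).2 hihc]
      have hn : (n + 1 - (b + 1)).toNat = (n - b).toNat := by omega
      rw [hn, ← hY']
      simp [cnt]

-- ===== VERDICT (by name: the statement is the Claim_ definition above) =====
theorem maxCount_spec : Claim_equal_maxCount := by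
  intro banned n maxSum _
  unfold Spec_maxCount maxCount maxCount_alt
  set bs := PySem.List.sorted (PySem.Set.ofList (banned.filter (fun b => decide (1 ≤ b) && decide (b ≤ n)))) (fun x => x) false with hbs
  have hpw : bs.Pairwise (· < ·) := by
    rw [hbs]; exact PySem.List.sorted_ofList_pairwise_lt _
  have hmembs : ∀ x : Int, x ∈ bs ↔ (x ∈ banned ∧ 1 ≤ x ∧ x ≤ n) := by
    intro x
    rw [hbs, PySem.List.mem_sorted, PySem.Set.mem_ofList, List.mem_filter]
    simp
  have hbd : ∀ b ∈ bs, 1 ≤ b ∧ b ≤ n := by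
    intro b hb; have := (hmembs b).mp hb; exact ⟨this.2.1, this.2.2⟩
  rw [loopA_eq _ n maxSum (n + 1 - 1).toNat 1 0 0 rfl,
    altLoopB_eq n bs 1 maxSum 0 le_rfl hpw hbd]
  have hpr : PySem.List.pyRange 1 (n + 1) 1 = irange 1 (n + 1 - 1).toNat := by
    rw [PySem.List.pyRange_one]; rfl
  rw [hpr]
  have hfe : (irange 1 (n + 1 - 1).toNat).filter (fun i => !((PySem.Set.ofList banned).contains i)) =
      (irange 1 (n + 1 - 1).toNat).filter (fun i => !(bs.contains i)) := by
    apply List.filter_congr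
    intro x hx
    have hxr := mem_irange hx
    have hxn : 1 ≤ x ∧ x ≤ n := by omega
    have hc : (PySem.Set.ofList banned).contains x = bs.contains x := by
      rw [Bool.eq_iff_iff]
      have h1 : (PySem.Set.ofList banned).contains x = true ↔ x ∈ banned := by
        simp [PySem.Set.mem_ofList]
      have h2 : bs.contains x = true ↔ x ∈ bs := by simp
      rw [h1, h2, hmembs x]
      tauto
    rw [hc]
  simp only [zero_add, sub_zero]
  exact congrArg (fun L => ((cnt L maxSum : Nat) : Int)) hfe
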